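-- pv_equiv track=rewrite | github.com/aliyenidede/vis | src/vis/report.py | _group_videos_by_source
-- ===== SOURCE A (Python) =====
-- from collections import OrderedDict
--
-- def _group_videos_by_source(videos: list) -> OrderedDict:
--     """Group videos by source. Playlist first, then channels alphabetically."""
--     groups = OrderedDict()
--     for v in videos:
--         source = v.get("source", "playlist")
--         if source not in groups:
--             groups[source] = []
--         groups[source].append(v)
--
--     # Sort: playlist first, then channels alphabetically
--     sorted_groups = OrderedDict()
--     if "playlist" in groups:
--         sorted_groups["playlist"] = groups.pop("playlist")
--     for key in sorted(groups.keys()):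
--         sorted_groups[key] = groups[key]
--     return sorted_groups
-- ===== SOURCE B (Python) =====
-- from collections import OrderedDict
-- from itertools import groupby
--
--
-- def _group_videos_by_source(videos: list) -> OrderedDict:
--     """Group videos by source (playlist first, then channels alphabetically)
--     by partitioning out the playlist videos, stably sorting the rest by
--     source and grouping consecutive runs with itertools.groupby."""
--     def src(v):
--         return v.get("source", "playlist")
--
--     playlist = [v for v in videos if src(v) == "playlist"]
--     others = sorted((v for v in videos if src(v) != "playlist"), key=src)
--     out = OrderedDict()
--     if playlist:
--         out["playlist"] = playlist
--     for key, grp in groupby(others, key=src):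
--         out[key] = list(grp)
--     return out
-- ===== Notes on version B (the rewrite author's own statement) =====
-- stated objective: alternative
-- what changed: A builds an insertion-ordered dict of groups in one pass and then reorders its keys (playlist first, remaining keys sorted); B instead partitions out the playlist videos, stably sorts the rest by source and groups consecutive runs with itertools.groupby (sort-then-group instead of group-then-reorder-keys).
import Mathlib
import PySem

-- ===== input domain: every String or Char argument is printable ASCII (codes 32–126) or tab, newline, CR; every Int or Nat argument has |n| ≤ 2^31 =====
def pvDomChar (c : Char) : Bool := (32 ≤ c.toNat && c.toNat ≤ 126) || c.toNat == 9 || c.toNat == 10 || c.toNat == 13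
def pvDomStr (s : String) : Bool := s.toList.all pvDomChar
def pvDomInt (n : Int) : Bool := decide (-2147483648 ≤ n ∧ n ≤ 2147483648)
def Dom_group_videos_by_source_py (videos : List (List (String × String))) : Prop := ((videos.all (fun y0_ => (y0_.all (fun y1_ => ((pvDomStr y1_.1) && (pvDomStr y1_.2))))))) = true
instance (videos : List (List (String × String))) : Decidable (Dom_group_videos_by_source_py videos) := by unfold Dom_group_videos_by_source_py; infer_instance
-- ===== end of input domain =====

-- B groups by sorting instead of A's dict-then-key-reorder; equal results proved below (objective: alternative algorithm, same output).

-- v.get("source", "playlist") — shared by both ports (it is the same expression in both Pythons)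
def pvSourceOf (v : List (String × String)) : String :=
  (PySem.Dict.mk v).getD "source" "playlist"

-- ===== PORT A =====
def group_videos_by_source_py (videos : List (List (String × String))) : List (String × List (List (String × String))) :=
  let groups : PySem.Dict String (List (List (String × String))) :=
    videos.foldl (fun groups v =>
      let source := pvSourceOf v
      let groups := if groups.contains source then groups else groups.insert source []
      groups.modify source [] (fun l => l ++ [v])) PySem.Dict.empty
  -- groups.pop("playlist") ported as getD + erase; under the contains-guard the key is present, so getD is exact
  let p := groups.contains "playlist"
  let sorted0 : PySem.Dict String (List (List (String × String))) :=
    if p then PySem.Dict.empty.insert "playlist" (groups.getD "playlist" []) else PySem.Dict.empty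
  let groups2 := if p then groups.erase "playlist" else groups
  -- groups[key] ported as getD: key is drawn from groups2.keys, so it is present and getD is exact
  ((PySem.List.sorted groups2.keys (fun k => k) false).foldl
      (fun sg key => sg.insert key (groups2.getD key [])) sorted0).items

-- ===== PORT B =====
-- itertools.groupby(xs, key=src): consecutive runs of equal key, each materialized
def gbRuns (xs : List (List (String × String))) : List (String × List (List (String × String))) :=
  match xs with
  | [] => []
  | v :: vs =>
    (pvSourceOf v, v :: vs.takeWhile (fun w => pvSourceOf w == pvSourceOf v)) ::
      gbRuns (vs.dropWhile (fun w => pvSourceOf w == pvSourceOf v))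
termination_by xs.length
decreasing_by
  simp only [List.length_cons]
  exact Nat.lt_succ_of_le (List.length_dropWhile_le _ _)

def group_videos_by_source_py_alt (videos : List (List (String × String))) : List (String × List (List (String × String))) :=
  let playlist := videos.filter (fun v => pvSourceOf v == "playlist")
  let others := PySem.List.sorted (videos.filter (fun v => pvSourceOf v != "playlist")) pvSourceOf false
  -- the OrderedDict only ever receives fresh keys (groupby after a sort), so its items are these appends (exact)
  (if playlist.isEmpty then [] else [("playlist", playlist)]) ++ gbRuns others

-- ===== PRECONDITION & SPEC =====
def Spec_group_videos_by_source_py (videos : List (List (String × String))) (out : List (String × List (List (String × String)))) : Prop := out = group_videos_by_source_py_alt videos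
instance (videos : List (List (String × String))) (out : List (String × List (List (String × String)))) : Decidable (Spec_group_videos_by_source_py videos out) := by unfold Spec_group_videos_by_source_py; infer_instance

-- ===== CLAIM (what is proved, stated in full; the proofs are below) =====
def Claim_equal_group_videos_by_source_py : Prop := ∀ (videos : List (List (String × String))), Dom_group_videos_by_source_py videos → Spec_group_videos_by_source_py videos (group_videos_by_source_py videos)

-- ===== LEMMAS AND PROOFS =====

-- ordered insertion of a key into a strictly increasing key list (dropping duplicates)
def linsert (x : String) : List String → List String
  | [] => [x]
  | k :: ks => if x < k then x :: k :: ks else if x = k then k :: ks else k :: linsert x ks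

theorem mem_linsert (x a : String) (K : List String) : a ∈ linsert x K ↔ a = x ∨ a ∈ K := by
  induction K with
  | nil => simp [linsert]
  | cons k ks ih =>
    simp only [linsert]
    split_ifs with h1 h2
    · simp [List.mem_cons]
    · subst h2
      simp only [List.mem_cons]
      constructor
      · intro h; exact Or.inr h
      · rintro (rfl | h)
        · exact Or.inl rfl
        · exact h
    · simp only [List.mem_cons, ih]
      tauto

theorem pairwise_linsert (x : String) (K : List String) (h : K.Pairwise (· < ·)) :
    (linsert x K).Pairwise (· < ·) := by
  induction K with
  | nil => simp [linsert]
  | cons k ks ih =>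
    rcases List.pairwise_cons.mp h with ⟨hk, hks⟩
    simp only [linsert]
    split_ifs with h1 h2
    · refine List.pairwise_cons.mpr ⟨?_, h⟩
      intro a ha
      rcases List.mem_cons.mp ha with rfl | ha
      · exact h1
      · exact lt_trans h1 (hk a ha)
    · exact h
    · refine List.pairwise_cons.mpr ⟨?_, ih hks⟩
      intro a ha
      rcases (mem_linsert x a ks).mp ha with rfl | ha
      · exact lt_of_le_of_ne (not_lt.mp h1) (Ne.symm h2)
      · exact hk a ha

theorem nodup_of_pairwise_lt (K : List String) (h : K.Pairwise (· < ·)) : K.Nodup :=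
  h.imp (fun hlt => ne_of_lt hlt)

theorem insertBy_all_before {α : Type} (before : α → α → Bool) (x : α) (l : List α)
    (h : ∀ y ∈ l, before x y = true) : PySem.List.insertBy before x l = x :: l := by
  cases l with
  | nil => simp [PySem.List.insertBy]
  | cons y ys => simp [PySem.List.insertBy, h y (List.mem_cons_self)]

theorem insertBy_append_not {α : Type} (before : α → α → Bool) (x : α) (p q : List α)
    (h : ∀ y ∈ p, before x y = false) :
    PySem.List.insertBy before x (p ++ q) = p ++ PySem.List.insertBy before x q := by
  induction p with
  | nil => simp
  | cons y ys ih =>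
    simp only [List.cons_append, PySem.List.insertBy, h y (List.mem_cons_self)]
    simp only [Bool.false_eq_true, if_false, List.cons_inj_right]
    exact ih (fun z hz => h z (List.mem_cons_of_mem _ hz))

-- inserting one element into a flatMap of strictly-increasing key groups
theorem insertBy_flatMap {α : Type} (f : α → String) (x : α) (K : List String) (G : String → List α)
    (hK : K.Pairwise (· < ·))
    (hG : ∀ k ∈ K, ∀ v ∈ G k, f v = k)
    (hx : f x ∉ K → G (f x) = []) :
    PySem.List.insertBy (fun a b => decide (f a < f b)) x (K.flatMap G)
      = (linsert (f x) K).flatMap (fun k => if k = f x then G k ++ [x] else G k) := by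
  induction K with
  | nil =>
    simp only [List.flatMap_nil, linsert, List.flatMap_cons, List.flatMap_nil,
      hx (by simp), List.nil_append, List.append_nil]
    simp [PySem.List.insertBy]
  | cons k ks ih =>
    rcases List.pairwise_cons.mp hK with ⟨hk, hks⟩
    have hGk : ∀ v ∈ G k, f v = k := hG k List.mem_cons_self
    have hGks : ∀ k' ∈ ks, ∀ v ∈ G k', f v = k' := fun k' h' => hG k' (List.mem_cons_of_mem _ h')
    rcases lt_trichotomy (f x) k with hlt | heq | hgt
    · -- new least key: x goes to the very front
      have hxout : f x ∉ (k :: ks) := by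
        intro hmem
        rcases List.mem_cons.mp hmem with rfl | hmem
        · exact lt_irrefl _ hlt
        · exact lt_irrefl _ (lt_trans hlt (hk _ hmem))
      have hfront : ∀ y ∈ (k :: ks).flatMap G, (decide (f x < f y)) = true := by
        intro y hy
        rcases List.mem_flatMap.mp hy with ⟨k', hk', hyk'⟩
        have : f y = k' := hG k' hk' y hyk'
        rcases List.mem_cons.mp hk' with rfl | hk'' <;> rw [this] <;> simp only [decide_eq_true_eq]
        · exact hlt
        · exact lt_trans hlt (hk _ hk'')
      have hcong : ∀ k' ∈ (k :: ks), (if k' = f x then G k' ++ [x] else G k') = G k' := by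
        intro k' hmem
        have : k' ≠ f x := by
          intro h; exact hxout (h ▸ hmem)
        simp [this]
      have hlin : linsert (f x) (k :: ks) = f x :: k :: ks := by
        simp [linsert, hlt]
      have htail : List.flatMap (fun k' => if k' = f x then G k' ++ [x] else G k') ks
          = List.flatMap G ks :=
        List.flatMap_congr (fun k' h => hcong k' (List.mem_cons_of_mem _ h))
      have hkne : k ≠ f x := fun h => hxout (h ▸ List.mem_cons_self)
      rw [insertBy_all_before _ _ _ hfront, hlin]
      simp only [List.flatMap_cons]
      simp [hx hxout, hkne, htail]
    · -- existing key: x goes right after its group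
      have hkks : k ∉ ks := fun hmem => lt_irrefl _ (hk _ hmem)
      have hnot : ∀ y ∈ G k, (decide (f x < f y)) = false := by
        intro y hy
        rw [hGk y hy, heq]
        simp
      have hafter : ∀ y ∈ ks.flatMap G, (decide (f x < f y)) = true := by
        intro y hy
        rcases List.mem_flatMap.mp hy with ⟨k', hk', hyk'⟩
        rw [hGks k' hk' y hyk', heq]
        simp only [decide_eq_true_eq]
        exact hk _ hk'
      have hcong : ∀ k' ∈ ks, (if k' = f x then G k' ++ [x] else G k') = G k' := by
        intro k' hmem
        have : k' ≠ f x := by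
          intro h; rw [heq] at h; exact hkks (h ▸ hmem)
        simp [this]
      have hlin : linsert (f x) (k :: ks) = k :: ks := by
        simp [linsert, heq]
      have htail : List.flatMap (fun k' => if k' = f x then G k' ++ [x] else G k') ks
          = List.flatMap G ks := List.flatMap_congr hcong
      rw [List.flatMap_cons, insertBy_append_not _ _ _ _ hnot, insertBy_all_before _ _ _ hafter,
        hlin]
      simp only [List.flatMap_cons]
      rw [if_pos heq.symm, htail]
      simp [List.append_assoc]
    · -- larger key: skip this group and recurse
      have hnot : ∀ y ∈ G k, (decide (f x < f y)) = false := by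
        intro y hy
        rw [hGk y hy]
        simp only [decide_eq_false_iff_not, not_lt]
        exact le_of_lt hgt
      have hx' : f x ∉ ks → G (f x) = [] := by
        intro hmem
        refine hx ?_
        intro hc
        rcases List.mem_cons.mp hc with rfl | hc
        · exact lt_irrefl _ hgt
        · exact hmem hc
      have hlin : linsert (f x) (k :: ks) = k :: linsert (f x) ks := by
        simp [linsert, not_lt.mpr (le_of_lt hgt), ne_of_gt hgt]
      have hGk' : (if k = f x then G k ++ [x] else G k) = G k := by
        simp [ne_of_lt hgt]
      rw [List.flatMap_cons, insertBy_append_not _ _ _ _ hnot, ih hks hGks hx', hlin]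
      simp only [List.flatMap_cons]
      rw [hGk']

-- sorted(set(xs + [x])) as ordered insertion into sorted(set(xs))
theorem sorted_set_append (xs : List String) (x : String) :
    PySem.List.sorted (PySem.Set.ofList (xs ++ [x])) (fun k => k) false
      = linsert x (PySem.List.sorted (PySem.Set.ofList xs) (fun k => k) false) := by
  have hKp : (PySem.List.sorted (PySem.Set.ofList xs) (fun k => k) false).Pairwise (· < ·) :=
    PySem.List.sorted_ofList_pairwise_lt xs
  have hp : (linsert x (PySem.List.sorted (PySem.Set.ofList xs) (fun k => k) false)).Pairwise (· < ·) :=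
    pairwise_linsert _ _ hKp
  refine PySem.List.sorted_eq_of_perm_of_pairwise_lt _ _ _ ?_ hp
  rw [List.perm_ext_iff_of_nodup (nodup_of_pairwise_lt _ hp) (PySem.Set.nodup_ofList _)]
  intro a
  rw [mem_linsert, PySem.List.mem_sorted, PySem.Set.mem_ofList, PySem.Set.mem_ofList,
    List.mem_append, List.mem_singleton]
  tauto

-- the stable sort decomposes as sorted distinct keys, each key contributing its filter run
theorem sorted_eq_flatMap {α : Type} (f : α → String) (xs : List α) :
    PySem.List.sorted xs f false
      = (PySem.List.sorted (PySem.Set.ofList (xs.map f)) (fun k => k) false).flatMap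
          (fun k => xs.filter (fun v => f v == k)) := by
  induction xs using List.reverseRecOn with
  | nil => rfl
  | append_singleton xs x ih =>
    have hstep : PySem.List.sorted (xs ++ [x]) f false
        = PySem.List.insertBy (fun a b => decide (f a < f b)) x (PySem.List.sorted xs f false) := by
      rw [PySem.List.sorted_eq_foldl_insertBy, PySem.List.sorted_eq_foldl_insertBy,
        List.foldl_append]
      rfl
    rw [hstep, ih]
    rw [insertBy_flatMap f x _ _ (PySem.List.sorted_ofList_pairwise_lt _)
      (fun k _ v hv => by simpa using (List.mem_filter.mp hv).2)
      (fun hout => by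
        rw [List.filter_eq_nil_iff]
        intro v hv hcl
        refine hout ?_
        rw [PySem.List.mem_sorted, PySem.Set.mem_ofList]
        have : f v = f x := by simpa using hcl
        exact this ▸ List.mem_map_of_mem hv)]
    rw [List.map_append, List.map_singleton, sorted_set_append]
    refine List.flatMap_congr ?_
    intro k _
    rw [List.filter_append]
    by_cases hk : k = f x
    · subst hk
      simp
    · have : ¬ (f x == k) = true := by simpa using fun h => hk h.symm
      simp [hk, this]

-- groupby over a flatMap of nonempty, correctly-keyed, strictly-increasing groups
theorem gbRuns_flatMap (K : List String) (G : String → List (List (String × String)))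
    (hK : K.Pairwise (· < ·))
    (hG : ∀ k ∈ K, ∀ v ∈ G k, pvSourceOf v = k)
    (hne : ∀ k ∈ K, G k ≠ []) :
    gbRuns (K.flatMap G) = K.map (fun k => (k, G k)) := by
  induction K with
  | nil => simp [gbRuns]
  | cons k ks ih =>
    rcases List.pairwise_cons.mp hK with ⟨hk, hks⟩
    obtain ⟨v, t, hGkeq⟩ : ∃ v t, G k = v :: t := by
      cases h : G k with
      | nil => exact absurd h (hne k List.mem_cons_self)
      | cons a b => exact ⟨a, b, rfl⟩
    have hGk := hG k List.mem_cons_self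
    have hfv : pvSourceOf v = k := hGk v (hGkeq ▸ List.mem_cons_self)
    have htake : (t ++ ks.flatMap G).takeWhile (fun w => pvSourceOf w == pvSourceOf v)
        = t ++ (ks.flatMap G).takeWhile (fun w => pvSourceOf w == pvSourceOf v) := by
      have ht : t.takeWhile (fun w => pvSourceOf w == pvSourceOf v) = t := by
        rw [List.takeWhile_eq_self_iff]
        intro w hw
        rw [hfv, hGk w (hGkeq ▸ List.mem_cons_of_mem _ hw)]
        simp
      rw [List.takeWhile_append, ht]
      simp
    have hdrop : (t ++ ks.flatMap G).dropWhile (fun w => pvSourceOf w == pvSourceOf v)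
        = (ks.flatMap G).dropWhile (fun w => pvSourceOf w == pvSourceOf v) := by
      have ht : t.dropWhile (fun w => pvSourceOf w == pvSourceOf v) = [] := by
        rw [List.dropWhile_eq_nil_iff]
        intro w hw
        rw [hfv, hGk w (hGkeq ▸ List.mem_cons_of_mem _ hw)]
        simp
      rw [List.dropWhile_append, ht]
      simp
    have hresttake : (ks.flatMap G).takeWhile (fun w => pvSourceOf w == pvSourceOf v) = [] := by
      cases hks' : ks with
      | nil => simp
      | cons k' ks' =>
        obtain ⟨v', t', hGk'eq⟩ : ∃ v' t', G k' = v' :: t' := by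
          cases h : G k' with
          | nil => exact absurd h (hne k' (hks' ▸ List.mem_cons_of_mem _ List.mem_cons_self))
          | cons a b => exact ⟨a, b, rfl⟩
        have hfv' : pvSourceOf v' = k' :=
          hG k' (hks' ▸ List.mem_cons_of_mem _ List.mem_cons_self) v'
            (hGk'eq ▸ List.mem_cons_self)
        have hkk' : k < k' := hk k' (hks' ▸ List.mem_cons_self)
        simp only [List.flatMap_cons, hGk'eq, List.cons_append]
        rw [List.takeWhile_cons_of_neg]
        rw [hfv, hfv']
        simp [ne_of_gt hkk']
    have hrestdrop : (ks.flatMap G).dropWhile (fun w => pvSourceOf w == pvSourceOf v)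
        = ks.flatMap G := by
      rw [List.dropWhile_eq_self_iff]
      cases hks' : ks with
      | nil => simp
      | cons k' ks' =>
        obtain ⟨v', t', hGk'eq⟩ : ∃ v' t', G k' = v' :: t' := by
          cases h : G k' with
          | nil => exact absurd h (hne k' (hks' ▸ List.mem_cons_of_mem _ List.mem_cons_self))
          | cons a b => exact ⟨a, b, rfl⟩
        have hfv' : pvSourceOf v' = k' :=
          hG k' (hks' ▸ List.mem_cons_of_mem _ List.mem_cons_self) v'
            (hGk'eq ▸ List.mem_cons_self)
        have hkk' : k < k' := hk k' (hks' ▸ List.mem_cons_self)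
        simp only [List.flatMap_cons, hGk'eq, List.cons_append]
        intro hl
        simp only [List.getElem_cons_zero]
        rw [hfv, hfv']
        simp [ne_of_gt hkk']
    rw [List.flatMap_cons, hGkeq, List.cons_append, gbRuns, htake, hdrop, hresttake, hrestdrop,
      hfv, ih hks (fun k' h' => hG k' (List.mem_cons_of_mem _ h'))
        (fun k' h' => hne k' (List.mem_cons_of_mem _ h'))]
    simp [hGkeq]

-- ---- dict-side helper lemmas ----

theorem insert_insert_fresh {ν : Type} (g : PySem.Dict String ν) (s : String) (v w : ν)
    (h : g.contains s = false) : (g.insert s v).insert s w = g.insert s w := by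
  have hall : ∀ p ∈ g.items, (p.1 == s) = false := by
    intro p hp
    simpa using List.any_eq_false.mp h p hp
  have h2 : ((PySem.Dict.mk (g.items ++ [(s, v)])).contains s) = true := by
    simp [PySem.Dict.contains]
  apply PySem.Dict.ext
  simp only [PySem.Dict.insert, h, Bool.false_eq_true, if_false, h2, if_true]
  simp only [List.map_append, List.map_cons, List.map_nil, beq_self_eq_true]
  congr 1
  have : List.map (fun p => if (p.1 == s) = true then (s, w) else p) g.items
      = List.map id g.items :=
    List.map_congr_left (fun p hp => by simp [hall p hp])
  rw [this, List.map_id]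

theorem getD_of_not_contains {ν : Type} (g : PySem.Dict String ν) (s : String) (x : ν)
    (h : g.contains s = false) : g.getD s x = x := by
  have : g.items.find? (fun p => p.1 == s) = none := by
    rw [List.find?_eq_none]
    intro p hp
    simp [List.any_eq_false.mp h p hp]
  simp [PySem.Dict.getD, PySem.Dict.get?, this]

theorem find?_filter_ne {ν : Type} (l : List (String × ν)) (k k' : String) (h : k' ≠ k) :
    (l.filter (fun p => !(p.1 == k))).find? (fun p => p.1 == k')
      = l.find? (fun p => p.1 == k') := by
  induction l with
  | nil => simp
  | cons p l ih =>
    by_cases hp : p.1 = k'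
    · have hp2 : (p.1 == k') = true := by simp [hp]
      have hk : (p.1 == k) = false := by simp [hp, h]
      simp [hk, hp2]
    · have hp2 : (p.1 == k') = false := by simp [hp]
      by_cases hpk : p.1 = k
      · have hkk' : (k == k') = false := by simp [Ne.symm h]
        simp [hpk, ih, hkk']
      · have hk2 : (p.1 == k) = false := by simp [hpk]
        simp [hk2, hp2, ih]

theorem getD_erase_of_ne {ν : Type} (d : PySem.Dict String ν) (k k' : String) (h : k' ≠ k)
    (x : ν) : (d.erase k).getD k' x = d.getD k' x := by
  simp [PySem.Dict.erase, PySem.Dict.getD, PySem.Dict.get?, find?_filter_ne _ _ _ h]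

theorem keys_erase {ν : Type} (d : PySem.Dict String ν) (k : String) :
    (d.erase k).keys = d.keys.filter (fun a => !(a == k)) := by
  simp [PySem.Dict.erase, PySem.Dict.keys, List.filter_map, Function.comp_def]

-- ---- the grouping dict of port A ----

def pvGroups (videos : List (List (String × String))) :
    PySem.Dict String (List (List (String × String))) :=
  videos.foldl (fun g v => g.modify (pvSourceOf v) [] (fun l => l ++ [v])) PySem.Dict.empty

theorem portA_groups (videos : List (List (String × String))) :
    videos.foldl (fun groups v =>
        let source := pvSourceOf v
        let groups := if groups.contains source then groups else groups.insert source []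
        groups.modify source [] (fun l => l ++ [v])) PySem.Dict.empty = pvGroups videos := by
  unfold pvGroups
  apply List.foldl_ext
  intro g v _
  by_cases hc : g.contains (pvSourceOf v) = true
  · simp only [hc, if_true]
  · have hc' : g.contains (pvSourceOf v) = false := by
      exact Bool.not_eq_true _ ▸ eq_false_of_ne_true hc
    simp only [hc', Bool.false_eq_true, if_false]
    rw [PySem.Dict.modify, PySem.Dict.modify, PySem.Dict.getD_insert_self,
      insert_insert_fresh _ _ _ _ hc', getD_of_not_contains _ _ _ hc']

theorem pvGroups_keys (videos : List (List (String × String))) :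
    (pvGroups videos).keys = PySem.Set.ofList (videos.map pvSourceOf) := by
  unfold pvGroups
  rw [PySem.Dict.keys_foldl_modify_key videos pvSourceOf [] (fun _ v => fun l => l ++ [v])
    PySem.Dict.empty]
  rfl

theorem pvGroups_getD (videos : List (List (String × String))) (k : String) :
    (pvGroups videos).getD k [] = videos.filter (fun v => pvSourceOf v == k) := by
  unfold pvGroups
  rw [(by exact (List.foldl_map (f := fun v => (pvSourceOf v, v))
        (g := fun d p => d.modify p.1 [] (fun l => l ++ [p.2]))
        (l := videos) (init := PySem.Dict.empty)).symm :
      videos.foldl (fun g v => g.modify (pvSourceOf v) [] (fun l => l ++ [v]))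
        PySem.Dict.empty
      = (videos.map (fun v => (pvSourceOf v, v))).foldl
          (fun d p => d.modify p.1 [] (fun l => l ++ [p.2])) PySem.Dict.empty)]
  rw [PySem.Dict.getD_foldl_modify_append]
  simp [List.filter_map, Function.comp_def, List.map_map]

-- ---- canonical form and the two halves ----

def pvOthers (videos : List (List (String × String))) : List (List (String × String)) :=
  videos.filter (fun v => pvSourceOf v != "playlist")

def pvK (videos : List (List (String × String))) : List String :=
  PySem.List.sorted (PySem.Set.ofList ((pvOthers videos).map pvSourceOf)) (fun k => k) false

def pvCanon (videos : List (List (String × String))) :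
    List (String × List (List (String × String))) :=
  (if (videos.filter (fun v => pvSourceOf v == "playlist")).isEmpty then []
   else [("playlist", videos.filter (fun v => pvSourceOf v == "playlist"))]) ++
    (pvK videos).map (fun k => (k, videos.filter (fun v => pvSourceOf v == k)))

theorem mem_pvK (videos : List (List (String × String))) (a : String) :
    a ∈ pvK videos ↔ (a ∈ videos.map pvSourceOf ∧ a ≠ "playlist") := by
  unfold pvK pvOthers
  rw [PySem.List.mem_sorted, PySem.Set.mem_ofList]
  constructor
  · intro h
    rcases List.mem_map.mp h with ⟨v, hv, rfl⟩
    rcases List.mem_filter.mp hv with ⟨hv1, hq⟩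
    exact ⟨List.mem_map_of_mem hv1, bne_iff_ne.mp hq⟩
  · rintro ⟨h, hne⟩
    rcases List.mem_map.mp h with ⟨v, hv, rfl⟩
    exact List.mem_map_of_mem (List.mem_filter.mpr ⟨hv, bne_iff_ne.mpr hne⟩)

theorem pvK_pairwise (videos : List (List (String × String))) : (pvK videos).Pairwise (· < ·) :=
  PySem.List.sorted_ofList_pairwise_lt _

theorem filter_others (videos : List (List (String × String))) (k : String)
    (h : k ≠ "playlist") :
    (pvOthers videos).filter (fun v => pvSourceOf v == k)
      = videos.filter (fun v => pvSourceOf v == k) := by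
  unfold pvOthers
  rw [List.filter_filter]
  apply List.filter_congr
  intro v _
  by_cases hv : pvSourceOf v = k
  · simp [hv, h]
  · simp [hv]

theorem B_eq_canon (videos : List (List (String × String))) :
    group_videos_by_source_py_alt videos = pvCanon videos := by
  have hB : group_videos_by_source_py_alt videos
      = (if (videos.filter (fun v => pvSourceOf v == "playlist")).isEmpty then []
         else [("playlist", videos.filter (fun v => pvSourceOf v == "playlist"))]) ++
          gbRuns (PySem.List.sorted (pvOthers videos) pvSourceOf false) := rfl
  rw [hB]
  unfold pvCanon
  congr 1
  rw [sorted_eq_flatMap pvSourceOf (pvOthers videos)]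
  rw [show PySem.List.sorted (PySem.Set.ofList ((pvOthers videos).map pvSourceOf))
        (fun k => k) false = pvK videos from rfl]
  rw [gbRuns_flatMap (pvK videos) _ (pvK_pairwise videos)
    (fun k _ v hv => by simpa using (List.mem_filter.mp hv).2)
    (fun k hk => by
      rcases List.mem_map.mp ((PySem.Set.mem_ofList _ _).mp ((PySem.List.mem_sorted _ _ _ _).mp hk))
        with ⟨v, hv, rfl⟩
      intro hnil
      rw [List.filter_eq_nil_iff] at hnil
      exact hnil v hv (by simp))]
  apply List.map_congr_left
  intro k hk
  have hkp : k ≠ "playlist" := ((mem_pvK videos k).mp hk).2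
  rw [filter_others videos k hkp]

theorem A_eq_canon (videos : List (List (String × String))) :
    group_videos_by_source_py videos = pvCanon videos := by
  unfold group_videos_by_source_py
  rw [portA_groups]
  have hkeys := pvGroups_keys videos
  have hnd : (pvGroups videos).keys.Nodup := by
    rw [hkeys]; exact PySem.Set.nodup_ofList _
  have hcontains : (pvGroups videos).contains "playlist"
      = decide ("playlist" ∈ videos.map pvSourceOf) := by
    rw [PySem.Dict.contains_eq_decide_mem_keys, hkeys]
    simp [PySem.Set.mem_ofList]
  have hmemK : ∀ a, a ∈ PySem.Set.ofList ((pvOthers videos).map pvSourceOf) ↔ a ∈ pvK videos :=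
    fun a => (PySem.List.mem_sorted _ _ _ _).symm
  by_cases hp : "playlist" ∈ videos.map pvSourceOf
  · have hc : (pvGroups videos).contains "playlist" = true := by rw [hcontains]; simp [hp]
    simp only [hc, if_true]
    have hEkeys : ((pvGroups videos).erase "playlist").keys
        = (pvGroups videos).keys.filter (fun a => !(a == "playlist")) := keys_erase _ _
    have hEnodup : ((pvGroups videos).erase "playlist").keys.Nodup := by
      rw [hEkeys]; exact hnd.filter _
    have hsortedK : PySem.List.sorted ((pvGroups videos).erase "playlist").keys
        (fun k => k) false = pvK videos := by
      apply PySem.List.sorted_eq_sorted_of_perm _ _ (fun k => k) (fun a b h => h)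
      rw [List.perm_ext_iff_of_nodup hEnodup (PySem.Set.nodup_ofList _)]
      intro a
      rw [hmemK a, mem_pvK, hEkeys, List.mem_filter, hkeys]
      simp [PySem.Set.mem_ofList]
    have hfresh : ∀ a ∈ PySem.List.sorted ((pvGroups videos).erase "playlist").keys
        (fun k => k) false,
        ((PySem.Dict.empty.insert "playlist"
          ((pvGroups videos).getD "playlist" [])).contains a) = false := by
      intro a ha
      rw [hsortedK] at ha
      have hane : a ≠ "playlist" := ((mem_pvK videos a).mp ha).2
      rw [PySem.Dict.contains_insert]
      simp [hane]
    have hndmap : (List.map (fun a => a)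
        (PySem.List.sorted ((pvGroups videos).erase "playlist").keys (fun k => k) false)).Nodup := by
      rw [List.map_id']
      exact ((PySem.List.sorted_perm _ _ _).nodup_iff).mpr hEnodup
    rw [PySem.Dict.items_foldl_insert_fresh _ (fun a => a)
      (fun key => ((pvGroups videos).erase "playlist").getD key []) _ hfresh hndmap]
    have hbase : (PySem.Dict.empty.insert "playlist"
        ((pvGroups videos).getD "playlist" [])).items
        = [("playlist", videos.filter (fun v => pvSourceOf v == "playlist"))] := by
      rw [pvGroups_getD]
      simp [PySem.Dict.insert, PySem.Dict.empty, PySem.Dict.contains]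
    have hne' : (videos.filter (fun v => pvSourceOf v == "playlist")).isEmpty = false := by
      rcases List.mem_map.mp hp with ⟨v, hv, hfvpl⟩
      simp only [List.isEmpty_eq_false_iff, ne_eq, List.filter_eq_nil_iff, not_forall]
      exact ⟨v, hv, by simp [hfvpl]⟩
    unfold pvCanon
    rw [hbase, hne', if_neg (by simp), hsortedK]
    congr 1
    apply List.map_congr_left
    intro a ha
    have hane : a ≠ "playlist" := ((mem_pvK videos a).mp ha).2
    rw [getD_erase_of_ne _ _ _ hane, pvGroups_getD]
  · have hc : (pvGroups videos).contains "playlist" = false := by rw [hcontains]; simp [hp]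
    simp only [hc, Bool.false_eq_true, if_false]
    have hsortedK : PySem.List.sorted (pvGroups videos).keys (fun k => k) false
        = pvK videos := by
      apply PySem.List.sorted_eq_sorted_of_perm _ _ (fun k => k) (fun a b h => h)
      rw [List.perm_ext_iff_of_nodup hnd (PySem.Set.nodup_ofList _)]
      intro a
      rw [hmemK a, mem_pvK, hkeys]
      simp only [PySem.Set.mem_ofList]
      constructor
      · intro h
        refine ⟨h, ?_⟩
        rintro rfl
        exact hp h
      · exact fun h => h.1
    have hfresh : ∀ a ∈ PySem.List.sorted (pvGroups videos).keys (fun k => k) false,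
        ((PySem.Dict.empty : PySem.Dict String (List (List (String × String)))).contains a)
          = false := by
      intro a _
      simp [PySem.Dict.contains, PySem.Dict.empty]
    have hndmap : (List.map (fun a => a)
        (PySem.List.sorted (pvGroups videos).keys (fun k => k) false)).Nodup := by
      rw [List.map_id']
      exact ((PySem.List.sorted_perm _ _ _).nodup_iff).mpr hnd
    rw [PySem.Dict.items_foldl_insert_fresh _ (fun a => a)
      (fun key => (pvGroups videos).getD key []) _ hfresh hndmap]
    have hnil : (videos.filter (fun v => pvSourceOf v == "playlist")) = [] := by
      rw [List.filter_eq_nil_iff]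
      intro v hv hcl
      exact hp (by
        have : pvSourceOf v = "playlist" := by simpa using hcl
        exact this ▸ List.mem_map_of_mem hv)
    unfold pvCanon
    rw [hnil, hsortedK]
    simp only [List.isEmpty_nil, if_true, PySem.Dict.empty, List.nil_append]
    apply List.map_congr_left
    intro a ha
    rw [pvGroups_getD]

theorem group_videos_by_source_py_spec : Claim_equal_group_videos_by_source_py := by
  intro videos _
  show group_videos_by_source_py videos = group_videos_by_source_py_alt videos
  rw [A_eq_canon, B_eq_canon]
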